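-- pv_equiv track=rewrite | github.com/Krishna9588/in_sides | app/agents/agent_3/root_cause_analysis/underlying_factors.py | _collect_factor_evidence
-- ===== SOURCE A (Python) =====
-- from typing import Dict, Any, List
--
-- def _collect_factor_evidence(problem_text: str, keywords: List[str]) -> List[str]:
--     """Collect evidence for factor identification"""
--     evidence = []
--
--     for keyword in keywords:
--         if keyword in problem_text:
--             # Find context around keyword
--             words = problem_text.split()
--             for i, word in enumerate(words):
--                 if keyword in word:
--                     # Get surrounding words for context
--                     start_idx = max(0, i - 3)
--                     end_idx = min(len(words), i + 4)
--                     context = ' '.join(words[start_idx:end_idx])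
--                     evidence.append(f"Keyword '{keyword}' found in context: '{context}'")
--                     break
--
--     return evidence
-- ===== SOURCE B (Python) =====
-- from typing import List
--
-- def _collect_factor_evidence(problem_text: str, keywords: List[str]) -> List[str]:
--     """Collect evidence for factor identification (single pass over the words)."""
--     words = problem_text.split()
--     first = {}
--     for i, word in enumerate(words):
--         for kw in keywords:
--             if kw not in first and kw in word:
--                 first[kw] = i
--     evidence = []
--     for kw in keywords:
--         if kw in first:
--             i = first[kw]
--             start = max(0, i - 3)
--             end = min(len(words), i + 4)
--             context = ' '.join(words[start:end])
--             evidence.append(f"Keyword '{kw}' found in context: '{context}'")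
--     return evidence
-- ===== Notes on version B (the rewrite author's own statement) =====
-- stated objective: alternative
-- what changed: Replaces A's per-keyword rescan (which re-splits the text and scans the word list once per keyword) with one pass over the split words that records each keyword's first matching word index in a dict, then emits the evidence strings by dict lookup in keyword order; the redundant 'keyword in problem_text' pre-check is dropped.
import Mathlib
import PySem

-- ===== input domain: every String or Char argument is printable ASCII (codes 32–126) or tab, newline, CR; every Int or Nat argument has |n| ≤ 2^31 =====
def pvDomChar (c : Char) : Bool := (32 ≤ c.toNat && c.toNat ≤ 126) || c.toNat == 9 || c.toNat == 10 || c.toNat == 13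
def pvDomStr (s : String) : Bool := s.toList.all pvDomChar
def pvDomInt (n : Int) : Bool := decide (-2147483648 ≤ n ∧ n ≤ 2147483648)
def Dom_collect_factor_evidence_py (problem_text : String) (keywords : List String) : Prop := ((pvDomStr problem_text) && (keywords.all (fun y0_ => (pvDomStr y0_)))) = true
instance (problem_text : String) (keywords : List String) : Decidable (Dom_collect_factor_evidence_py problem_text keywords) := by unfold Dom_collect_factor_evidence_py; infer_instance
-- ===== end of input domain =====

-- B replaces A's per-keyword rescan (re-splitting the text and scanning the word list once per
-- keyword) with one pass over the split words recording each keyword's first matching word index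
-- in a dict, then emits the evidence strings by dict lookup in keyword order (alternative
-- decomposition; the redundant `keyword in problem_text` pre-check is dropped).

-- shared literal pieces of both Pythons: the f-string and the context expression
def pvFmt (keyword context : String) : String :=
  "Keyword '" ++ keyword ++ "' found in context: '" ++ context ++ "'"

def pvCtx (words : List String) (i : Int) : String :=
  PySem.Str.join " " (PySem.List.slice words (some (max 0 (i - 3))) (some (min (words.length : Int) (i + 4))))

-- ===== PORT A =====
-- inner `for i, word in enumerate(words): if keyword in word: … ; break`
def pvScanA (keyword : String) (words : List String) : List (Int × String) → Option String
  | [] => none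
  | (i, word) :: rest =>
    if PySem.Str.isIn keyword word then some (pvFmt keyword (pvCtx words i))
    else pvScanA keyword words rest

def collect_factor_evidence_py (problem_text : String) (keywords : List String) : List String :=
  keywords.foldl (fun evidence keyword =>
    if PySem.Str.isIn keyword problem_text then
      let words := PySem.Str.split₀ problem_text
      match pvScanA keyword words (PySem.List.enumerate words 0) with
      | some e => evidence ++ [e]
      | none => evidence
    else evidence) []

-- ===== PORT B =====
-- `if kw not in first and kw in word: first[kw] = i` for one word, over the keyword list
def pvStep (i : Int) (word : String) (d : PySem.Dict String Int) (kw : String) : PySem.Dict String Int :=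
  if !(d.contains kw) && PySem.Str.isIn kw word then d.insert kw i else d

-- the single pass `for i, word in enumerate(words): for kw in keywords: …`
def pvBuild (keywords : List String) : List (Int × String) → PySem.Dict String Int → PySem.Dict String Int
  | [], d => d
  | (i, word) :: rest, d => pvBuild keywords rest (keywords.foldl (pvStep i word) d)

def collect_factor_evidence_py_alt (problem_text : String) (keywords : List String) : List String :=
  let words := PySem.Str.split₀ problem_text
  let first := pvBuild keywords (PySem.List.enumerate words 0) PySem.Dict.empty
  keywords.foldl (fun evidence kw =>
    match first.get? kw with
    | some i => evidence ++ [pvFmt kw (pvCtx words i)]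
    | none => evidence) []

-- ===== PRECONDITION & SPEC =====
def Spec_collect_factor_evidence_py (problem_text : String) (keywords : List String) (out : List String) : Prop := out = collect_factor_evidence_py_alt problem_text keywords
instance (problem_text : String) (keywords : List String) (out : List String) : Decidable (Spec_collect_factor_evidence_py problem_text keywords out) := by unfold Spec_collect_factor_evidence_py; infer_instance

-- ===== CLAIM (what is proved, stated in full; the proofs are below) =====
def Claim_equal_collect_factor_evidence_py : Prop := ∀ (problem_text : String) (keywords : List String), Dom_collect_factor_evidence_py problem_text keywords → Spec_collect_factor_evidence_py problem_text keywords (collect_factor_evidence_py problem_text keywords)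

-- ===== LEMMAS AND PROOFS =====

-- index of the first enumerated word containing kw (proof-side characterisation)
def pvFirst (kw : String) : List (Int × String) → Option Int
  | [] => none
  | (i, w) :: rest => if PySem.Str.isIn kw w then some i else pvFirst kw rest

theorem pvScanA_eq (kw : String) (words : List String) (pairs : List (Int × String)) :
    pvScanA kw words pairs = (pvFirst kw pairs).map (fun i => pvFmt kw (pvCtx words i)) := by
  induction pairs with
  | nil => rfl
  | cons p rest ih =>
    obtain ⟨i, w⟩ := p
    simp only [pvScanA, pvFirst]
    split <;> simp [ih]

theorem pvFold_get (w : String) (i : Int) (kw : String) (ks : List String) (d : PySem.Dict String Int) :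
    (ks.foldl (pvStep i w) d).get? kw =
      if kw ∈ ks then
        (d.get? kw).or (if PySem.Str.isIn kw w then some i else none)
      else d.get? kw := by
  induction ks generalizing d with
  | nil => simp
  | cons k ks ih =>
    simp only [List.foldl_cons, ih]
    have hstep : (pvStep i w d k).get? kw =
        if kw = k then (d.get? kw).or (if PySem.Str.isIn kw w then some i else none)
        else d.get? kw := by
      unfold pvStep
      by_cases hk : kw = k
      · subst hk
        by_cases hc : d.contains kw
        · have : d.get? kw ≠ none := by
            rw [PySem.Dict.contains_eq_isSome_get?] at hc
            exact fun h => by simp [h] at hc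
          obtain ⟨v, hv⟩ := Option.ne_none_iff_exists'.mp this
          simp [hc, hv]
        · have hn : d.get? kw = none := by
            rw [PySem.Dict.contains_eq_isSome_get?] at hc
            cases h : d.get? kw with
            | none => rfl
            | some v => simp [h] at hc
          simp only [hc, Bool.not_eq_true] at *
          simp only [Bool.not_false, Bool.true_and, hn, Option.none_or]
          split <;> simp [hn]
      · split
        · rw [PySem.Dict.get?_insert]; simp [hk]
        · rfl
    rw [hstep]
    by_cases hk : kw = k
    · subst hk
      by_cases hm : kw ∈ ks
      · simp only [hm, if_pos, List.mem_cons, true_or]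
        cases d.get? kw <;> cases h : PySem.Str.isIn kw w <;> simp [Option.or]
      · simp [hm]
    · by_cases hm : kw ∈ ks <;> simp [hm, hk]

theorem pvBuild_get (keywords : List String) (kw : String) (hkw : kw ∈ keywords) :
    ∀ (pairs : List (Int × String)) (d : PySem.Dict String Int),
      (pvBuild keywords pairs d).get? kw = (d.get? kw).or (pvFirst kw pairs) := by
  intro pairs
  induction pairs with
  | nil => intro d; simp [pvBuild, pvFirst]
  | cons p rest ih =>
    intro d
    obtain ⟨i, w⟩ := p
    simp only [pvBuild, pvFirst, ih, pvFold_get, hkw, if_pos]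
    cases d.get? kw <;> cases h : PySem.Str.isIn kw w <;> simp [Option.or]

-- every word produced by split() is an infix of the original character list
theorem pvSplit_go_infix : ∀ (s cur : List Char) (acc : List (List Char)) (w : List Char),
    w ∈ PySem.Chars.split₀.go s cur acc → w ∈ acc ∨ w <:+: (cur.reverse ++ s) := by
  intro s
  induction s with
  | nil =>
    intro cur acc w hw
    unfold PySem.Chars.split₀.go at hw
    split at hw
    · exact Or.inl (List.mem_reverse.mp hw)
    · rcases List.mem_cons.mp (List.mem_reverse.mp hw) with h | h
      · exact Or.inr (by simp [h])
      · exact Or.inl h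
  | cons c rest ih =>
    intro cur acc w hw
    unfold PySem.Chars.split₀.go at hw
    split at hw
    · split at hw
      · rcases ih [] acc w hw with h | h
        · exact Or.inl h
        · exact Or.inr (h.trans ⟨cur.reverse ++ [c], [], by simp⟩)
      · rcases ih [] (cur.reverse :: acc) w hw with h | h
        · rcases List.mem_cons.mp h with h | h
          · exact Or.inr ⟨[], c :: rest, by simp [h]⟩
          · exact Or.inl h
        · exact Or.inr (h.trans ⟨cur.reverse ++ [c], [], by simp⟩)
    · rcases ih (c :: cur) acc w hw with h | h
      · exact Or.inl h
      · exact Or.inr (by simpa using h)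

theorem pvSplit_infix (s w : List Char) (hw : w ∈ PySem.Chars.split₀ s) : w <:+: s := by
  rcases pvSplit_go_infix s [] [] w hw with h | h
  · simp at h
  · simpa using h

theorem pvFirst_some_exists (kw : String) :
    ∀ (pairs : List (Int × String)) (i : Int), pvFirst kw pairs = some i →
      ∃ p ∈ pairs, PySem.Str.isIn kw p.2 = true := by
  intro pairs
  induction pairs with
  | nil => intro i h; simp [pvFirst] at h
  | cons p rest ih =>
    intro i h
    obtain ⟨j, w⟩ := p
    by_cases hin : PySem.Str.isIn kw w = true
    · exact ⟨(j, w), by simp, hin⟩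
    · simp only [pvFirst, hin, if_neg, Bool.not_eq_true] at h
      obtain ⟨q, hq, hq2⟩ := ih i (by simpa [hin] using h)
      exact ⟨q, List.mem_cons_of_mem _ hq, hq2⟩

theorem pvFirst_none_of_not_isIn (t kw : String) (h : PySem.Str.isIn kw t = false) :
    pvFirst kw (PySem.List.enumerate (PySem.Str.split₀ t) 0) = none := by
  cases hf : pvFirst kw (PySem.List.enumerate (PySem.Str.split₀ t) 0) with
  | none => rfl
  | some i =>
    exfalso
    obtain ⟨p, hp, hin⟩ := pvFirst_some_exists kw _ i hf
    have hwmem : p.2 ∈ PySem.Str.split₀ t := by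
      have := congrArg (List.map Prod.snd) (rfl : PySem.List.enumerate (PySem.Str.split₀ t) 0 = _)
      have h2 : p.2 ∈ (PySem.List.enumerate (PySem.Str.split₀ t) 0).map Prod.snd :=
        List.mem_map.mpr ⟨p, hp, rfl⟩
      simpa [PySem.List.map_snd_enumerate] using h2
    have hinf1 : kw.toList <:+: p.2.toList := (PySem.Str.isIn_iff_infix _ _).mp hin
    have hinf2 : p.2.toList <:+: t.toList := by
      apply pvSplit_infix
      have : p.2.toList ∈ (PySem.Str.split₀ t).map String.toList := List.mem_map.mpr ⟨p.2, hwmem, rfl⟩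
      simpa [PySem.Str.split₀_map_toList] using this
    have hT : PySem.Str.isIn kw t = true := (PySem.Str.isIn_iff_infix _ _).mpr (hinf1.trans hinf2)
    rw [h] at hT
    exact Bool.false_ne_true hT

-- ===== VERDICT (by name: the statement is the Claim_ definition above) =====
theorem collect_factor_evidence_py_spec : Claim_equal_collect_factor_evidence_py := by
  intro problem_text keywords _
  unfold Spec_collect_factor_evidence_py collect_factor_evidence_py collect_factor_evidence_py_alt
  apply PySem.List.foldl_congr_mem
  intro acc kw hkw
  have hget := pvBuild_get keywords kw hkw (PySem.List.enumerate (PySem.Str.split₀ problem_text) 0) PySem.Dict.empty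
  simp only [PySem.Dict.get?_empty, Option.none_or] at hget
  by_cases h : PySem.Str.isIn kw problem_text
  · simp only [h, if_pos, pvScanA_eq, hget]
    cases pvFirst kw (PySem.List.enumerate (PySem.Str.split₀ problem_text) 0) <;> simp
  · have hn := pvFirst_none_of_not_isIn problem_text kw (by simpa using h)
    have h' : PySem.Chars.isIn kw.toList problem_text.toList = false := by
      simpa [PySem.Str.isIn] using h
    simp [h', hget, hn]
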